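-- pv_equiv track=rewrite | github.com/anthonylangsworth/EDMFAT | edmfs/event_processors.py | _get_event_minor_faction_impact
-- ===== SOURCE A (Python) =====
-- from typing import Optional, Dict, Union, Any, Set, List, Tuple
--
-- def _get_event_minor_faction_impact(event_minor_faction: str, system_minor_factions:iter, inverted:bool = False) -> Tuple[Set[str], Set[str]]:
--     """
--     Return a tuple containing the minor factions this event supported ("pro") and undermined ("anti").
--
--     Technically, there are four states but a pro/anti split is sufficient for this plug-in. The states are:
--     1. Direct support: Increases the influence of that minor faction, such as completing a mission for that faction. Considered "pro".
--     2. Direct undermine: Decrease the influence of that minor faction, such as an assassination mission against a ship for that faction. Considered "anti".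
--     3. Indirect support: Decrease the influence of another minor faction in that system. Considered "pro".
--     4. Indirect undermine: Increase the influence of another minor faction in that system. Considered "anti".
--     """
--     if event_minor_faction in system_minor_factions:
--         pro = {minor_faction for minor_faction in system_minor_factions if (minor_faction == event_minor_faction)}
--         anti = {minor_faction for minor_faction in system_minor_factions if (minor_faction != event_minor_faction)}
--     else:
--         pro = set([event_minor_faction])
--         anti = set()
--     return (pro, anti) if not inverted else (anti, pro)
-- ===== SOURCE B (Python) =====
-- def _get_event_minor_faction_impact(event_minor_faction: str, system_minor_factions, inverted: bool = False):
--     """Single pass with an accumulator: walk the factions once, noting whether the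
--     event faction occurs and accumulating the other factions into a set."""
--     anti = set()
--     found = False
--     for faction in system_minor_factions:
--         if faction == event_minor_faction:
--             found = True
--         else:
--             anti.add(faction)
--     if not found:
--         anti = set()
--     pro = {event_minor_faction}
--     return (anti, pro) if inverted else (pro, anti)
-- ===== Notes on version B (the rewrite author's own statement) =====
-- stated objective: alternative
-- what changed: B replaces A's membership test plus branch with two filtering set-comprehensions by a single explicit loop with an accumulator: one pass sets a found flag when the event faction occurs and accumulates every other faction into the anti set, which is discarded afterwards if the flag never fired.
import Mathlib
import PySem

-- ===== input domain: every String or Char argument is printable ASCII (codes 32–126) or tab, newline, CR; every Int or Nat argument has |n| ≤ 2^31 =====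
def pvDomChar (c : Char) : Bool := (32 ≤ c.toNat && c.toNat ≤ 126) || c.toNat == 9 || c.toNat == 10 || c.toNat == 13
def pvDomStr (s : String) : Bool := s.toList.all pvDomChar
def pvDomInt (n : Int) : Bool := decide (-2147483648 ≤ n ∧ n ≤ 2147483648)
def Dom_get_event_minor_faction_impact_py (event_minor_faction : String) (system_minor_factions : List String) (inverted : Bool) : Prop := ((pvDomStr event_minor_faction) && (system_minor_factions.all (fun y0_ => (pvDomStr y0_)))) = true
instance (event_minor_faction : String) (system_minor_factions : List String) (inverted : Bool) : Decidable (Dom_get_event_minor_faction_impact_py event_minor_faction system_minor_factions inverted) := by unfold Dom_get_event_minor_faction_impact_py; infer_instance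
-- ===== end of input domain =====

-- B replaces A's branch with two filtering set-comprehensions by ONE explicit pass over the
-- factions with an accumulator (a found flag plus dedup list of the other factions); objective: alternative.

-- ===== PORT A =====
def get_event_minor_faction_impact_py (event_minor_faction : String) (system_minor_factions : List String) (inverted : Bool) : List String × List String :=
  let (pro, anti) :=
    if system_minor_factions.contains event_minor_faction then
      (PySem.Set.ofList (system_minor_factions.filter (fun minor_faction => minor_faction == event_minor_faction)),
       PySem.Set.ofList (system_minor_factions.filter (fun minor_faction => minor_faction != event_minor_faction)))
    else
      (PySem.Set.ofList [event_minor_faction], PySem.Set.empty)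
  if !inverted then (pro, anti) else (anti, pro)

-- ===== PORT B =====
-- the loop body of Source B: if faction == e then set the flag, else anti.add(faction)
def pvStepB (e : String) (s : PySem.Set String × Bool) (faction : String) : PySem.Set String × Bool :=
  if faction == e then (s.1, true)
  else (PySem.Set.add s.1 faction, s.2)

def get_event_minor_faction_impact_py_alt (event_minor_faction : String) (system_minor_factions : List String) (inverted : Bool) : List String × List String :=
  let st := system_minor_factions.foldl (pvStepB event_minor_faction) (PySem.Set.empty, false)
  let anti : PySem.Set String := if st.2 then st.1 else PySem.Set.empty
  let pro : PySem.Set String := PySem.Set.add PySem.Set.empty event_minor_faction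
  if inverted then (anti, pro) else (pro, anti)

-- ===== PRECONDITION & SPEC =====
def Spec_get_event_minor_faction_impact_py (event_minor_faction : String) (system_minor_factions : List String) (inverted : Bool) (out : List String × List String) : Prop := out = get_event_minor_faction_impact_py_alt event_minor_faction system_minor_factions inverted
instance (event_minor_faction : String) (system_minor_factions : List String) (inverted : Bool) (out : List String × List String) : Decidable (Spec_get_event_minor_faction_impact_py event_minor_faction system_minor_factions inverted out) := by unfold Spec_get_event_minor_faction_impact_py; infer_instance

-- ===== CLAIM =====
def Claim_equal_get_event_minor_faction_impact_py : Prop := ∀ (event_minor_faction : String) (system_minor_factions : List String) (inverted : Bool), Dom_get_event_minor_faction_impact_py event_minor_faction system_minor_factions inverted → Spec_get_event_minor_faction_impact_py event_minor_faction system_minor_factions inverted (get_event_minor_faction_impact_py event_minor_faction system_minor_factions inverted)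

-- ===== LEMMAS AND PROOFS =====

-- B's one-pass fold computes (dedup of the elements ≠ e, whether e occurs)
theorem pv_foldl_stepB (e : String) (xs : List String) : ∀ (acc : PySem.Set String) (b : Bool),
    xs.foldl (pvStepB e) (acc, b) =
      ((xs.filter (fun m => m != e)).foldl PySem.Set.add acc, b || xs.contains e) := by
  induction xs with
  | nil => intro acc b; simp
  | cons x xs ih =>
    intro acc b
    by_cases hx : x = e
    · subst hx
      simp only [List.foldl_cons, pvStepB, BEq.rfl, if_pos, List.filter_cons, bne_self_eq_false,
        Bool.false_eq_true, if_false, List.contains_cons, BEq.rfl, Bool.true_or, Bool.or_true]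
      exact ih acc true
    · have hbe : (x == e) = false := by simp [hx]
      simp only [List.foldl_cons, pvStepB, hbe, Bool.false_eq_true, if_false,
        List.filter_cons, bne, hbe, Bool.not_false, if_pos, List.contains_cons]
      rw [ih (PySem.Set.add acc x) b]
      have heb : (e == x) = false := by simp [Ne.symm hx]
      simp [bne, heb]

-- adding an element that satisfies p commutes with filtering by p
theorem pv_add_filter (p : String → Bool) (acc : List String) (y : String) (hy : p y = true) :
    PySem.Set.add (acc.filter p) y = (PySem.Set.add acc y).filter p := by
  simp only [PySem.Set.add, PySem.Set.contains]
  by_cases h : y ∈ acc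
  · simp [h, hy]
  · simp [h, hy, List.filter_append]

-- filtering commutes with Python set construction (foldl over Set.add)
theorem pv_foldl_add_filter (p : String → Bool) (xs : List String) : ∀ (acc : List String),
    (xs.filter p).foldl PySem.Set.add (acc.filter p) = (xs.foldl PySem.Set.add acc).filter p := by
  induction xs with
  | nil => intro acc; simp
  | cons x xs ih =>
    intro acc
    by_cases hp : p x = true
    · simp only [List.filter_cons, hp, if_pos, List.foldl_cons, pv_add_filter p acc x hp]
      exact ih (PySem.Set.add acc x)
    · have habs : (PySem.Set.add acc x).filter p = acc.filter p := by
        simp only [PySem.Set.add]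
        split
        · rfl
        · simp [List.filter_append, hp]
      simp only [List.filter_cons, hp, List.foldl_cons, Bool.false_eq_true, if_false]
      rw [← habs, ih (PySem.Set.add acc x)]

theorem pv_ofList_filter (p : String → Bool) (xs : List String) :
    PySem.Set.ofList (xs.filter p) = (PySem.Set.ofList xs).filter p := by
  have := pv_foldl_add_filter p xs []
  simpa [PySem.Set.ofList] using this

-- in a duplicate-free list containing e, the elements equal to e are exactly [e]
theorem pv_filter_eq_self (e : String) (l : List String) (hn : l.Nodup) (he : e ∈ l) :
    l.filter (fun x => x == e) = [e] := by
  induction l with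
  | nil => cases he
  | cons a l ih =>
    rcases List.mem_cons.mp he with h | h
    · subst h
      have hnil : l.filter (fun x => x == e) = [] := by
        refine List.filter_eq_nil_iff.mpr ?_
        intro x hx
        have : x ≠ e := fun hxa => (List.nodup_cons.mp hn).1 (hxa ▸ hx)
        simp [this]
      simp [hnil]
    · have hne : a ≠ e := fun hae => (List.nodup_cons.mp hn).1 (hae ▸ h)
      simp [hne, ih (List.nodup_cons.mp hn).2 h]

theorem get_event_minor_faction_impact_py_eq (e : String) (sys : List String) (inv : Bool) :
    get_event_minor_faction_impact_py e sys inv = get_event_minor_faction_impact_py_alt e sys inv := by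
  unfold get_event_minor_faction_impact_py get_event_minor_faction_impact_py_alt
  rw [show (PySem.Set.empty (α := String), false) = (([] : List String), false) from rfl,
      pv_foldl_stepB e sys [] false]
  have hadd : PySem.Set.add (PySem.Set.empty (α := String)) e = [e] := by
    simp [PySem.Set.add, PySem.Set.empty, PySem.Set.contains]
  have hanti : (sys.filter (fun m => m != e)).foldl PySem.Set.add [] =
      PySem.Set.ofList (sys.filter (fun m => m != e)) := rfl
  by_cases hm : e ∈ sys
  · have hc : sys.contains e = true := by simpa using hm
    have hpro : PySem.Set.ofList (sys.filter (fun m => m == e)) = [e] := by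
      rw [pv_ofList_filter]
      exact pv_filter_eq_self e _ (PySem.Set.nodup_ofList sys) ((PySem.Set.mem_ofList _ _).mpr hm)
    simp only [hc, if_pos, Bool.false_or, hadd, hanti, hpro]
    cases inv <;> simp
  · have hc : sys.contains e = false := by simpa using hm
    simp only [hc, Bool.false_eq_true, if_false, Bool.false_or, hadd]
    have : PySem.Set.ofList [e] = [e] := by
      simp [PySem.Set.ofList, PySem.Set.add, PySem.Set.empty, PySem.Set.contains]
    cases inv <;> simp [this, PySem.Set.empty]

-- ===== VERDICT =====
theorem get_event_minor_faction_impact_py_spec : Claim_equal_get_event_minor_faction_impact_py := by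
  intro e sys inv _
  exact get_event_minor_faction_impact_py_eq e sys inv
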